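-- pv_equiv track=rewrite | github.com/JanPanjan/MatKem | bin/benzenoid_symmetry.py | order_of_rotation
-- ===== SOURCE A (Python) =====
-- def order_of_rotation(bec):
--     """
--     Determine the rotational symmetry order for the
--     benzenoid with the given boundary-edges code.
--     """
--     for order in [6, 3, 2]:
--         if len(bec) % order != 0:
--             continue
--         t = len(bec) // order
--         valid = True
--         for i in range(1, order):
--             if bec[:t] != bec[i * t : (i + 1) * t]:
--                 valid = False
--                 break
--         if valid:
--             return order
--     return 1
-- ===== SOURCE B (Python) =====
-- def order_of_rotation(bec):
--     """
--     Determine the rotational symmetry order for the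
--     benzenoid with the given boundary-edges code.
--     """
--     n = len(bec)
--     for order in [6, 3, 2]:
--         if n % order == 0:
--             t = n // order
--             if bec == bec[t:] + bec[:t]:
--                 return order
--     return 1
-- ===== Notes on version B (the rewrite author's own statement) =====
-- stated objective: alternative
-- what changed: Replaces the inner block-by-block loop (comparing every block bec[i*t:(i+1)*t] against bec[:t]) by a single cyclic-rotation test bec == bec[t:] + bec[:t], which is equivalent because t divides len(bec).
import Mathlib
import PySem

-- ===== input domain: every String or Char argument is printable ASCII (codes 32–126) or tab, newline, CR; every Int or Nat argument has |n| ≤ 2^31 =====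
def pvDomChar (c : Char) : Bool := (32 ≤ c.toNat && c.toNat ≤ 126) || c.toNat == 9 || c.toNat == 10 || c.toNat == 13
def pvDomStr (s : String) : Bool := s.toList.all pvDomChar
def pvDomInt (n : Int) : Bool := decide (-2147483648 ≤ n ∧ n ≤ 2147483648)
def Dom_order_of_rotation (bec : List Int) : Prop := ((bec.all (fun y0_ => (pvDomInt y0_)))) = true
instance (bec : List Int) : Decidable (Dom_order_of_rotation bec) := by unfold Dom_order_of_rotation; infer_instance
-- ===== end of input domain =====

-- B replaces A's inner block-by-block comparison loop by a single cyclic-rotation test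
-- bec == bec[t:] + bec[:t] (equivalent because t divides len(bec)); same cost, different decomposition.

-- ===== PORT A =====
-- inner loop: `for i in range(1, order): if bec[:t] != bec[i*t:(i+1)*t]: valid = False; break`
def pvAInner (bec : List Int) (t : Int) : List Int → Bool
  | [] => true
  | i :: rest =>
    if PySem.List.slice bec none (some t) ≠ PySem.List.slice bec (some (i * t)) (some ((i + 1) * t)) then
      false
    else pvAInner bec t rest

-- outer loop: `for order in [6, 3, 2]: …`
def pvAOuter (bec : List Int) : List Int → Int
  | [] => 1
  | order :: rest =>
    if PySem.Int.mod (bec.length : Int) order ≠ 0 then pvAOuter bec rest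
    else
      let t := PySem.Int.floordiv (bec.length : Int) order
      if pvAInner bec t (PySem.List.pyRange 1 order 1) then order else pvAOuter bec rest

def order_of_rotation (bec : List Int) : Int := pvAOuter bec [6, 3, 2]

-- ===== PORT B =====
def pvBLoop (bec : List Int) (n : Int) : List Int → Int
  | [] => 1
  | order :: rest =>
    if PySem.Int.mod n order = 0 then
      let t := PySem.Int.floordiv n order
      if bec = PySem.List.slice bec (some t) none ++ PySem.List.slice bec none (some t) then order
      else pvBLoop bec n rest
    else pvBLoop bec n rest

def order_of_rotation_alt (bec : List Int) : Int :=
  pvBLoop bec (bec.length : Int) [6, 3, 2]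

-- ===== PRECONDITION & SPEC =====
def Spec_order_of_rotation (bec : List Int) (out : Int) : Prop := out = order_of_rotation_alt bec
instance (bec : List Int) (out : Int) : Decidable (Spec_order_of_rotation bec out) := by unfold Spec_order_of_rotation; infer_instance

-- ===== CLAIM (what is proved, stated in full; the proofs are below) =====
def Claim_equal_order_of_rotation : Prop := ∀ (bec : List Int), Dom_order_of_rotation bec → Spec_order_of_rotation bec (order_of_rotation bec)

-- ===== LEMMAS AND PROOFS =====

-- A's inner loop returns true iff every compared block equals the first block.
lemma pvAInner_eq_true_iff (bec : List Int) (t : Int) (is : List Int) :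
    pvAInner bec t is = true ↔
      ∀ i ∈ is, PySem.List.slice bec none (some t) = PySem.List.slice bec (some (i * t)) (some ((i + 1) * t)) := by
  induction is with
  | nil => simp [pvAInner]
  | cons i rest ih =>
    by_cases h : PySem.List.slice bec none (some t) = PySem.List.slice bec (some (i * t)) (some ((i + 1) * t))
    · simp [pvAInner, h, ih]
    · simp [pvAInner, h]

-- bec[i*t:(i+1)*t] for an integer i ≥ 0 is the i-th block of length t.
lemma pvSlice_block (xs : List Int) (m : Nat) (i : Int) (hi : 0 ≤ i) :
    PySem.List.slice xs (some (i * (m : Int))) (some ((i + 1) * (m : Int))) =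
      (xs.drop (i.toNat * m)).take m := by
  have h1 : i * (m : Int) = ((i.toNat * m : Nat) : Int) := by
    push_cast [Int.toNat_of_nonneg hi]; ring
  have h2 : (i + 1) * (m : Int) = ((i.toNat * m : Nat) : Int) + ((m : Nat) : Int) := by
    push_cast [Int.toNat_of_nonneg hi]; ring
  rw [h1, h2, PySem.List.slice_natCast_add]

-- If every block of l equals the first one, l is k copies of its first block.
lemma pvEqFlatten (t : Nat) : ∀ (k : Nat) (l : List Int), l.length = k * t →
    (∀ i, i < k → (l.drop (i * t)).take t = l.take t) →
    l = (List.replicate k (l.take t)).flatten := by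
  intro k
  induction k with
  | zero =>
    intro l hn _
    have : l = [] := List.length_eq_zero_iff.mp (by simpa using hn)
    simp [this]
  | succ j ih =>
    intro l hn hb
    rcases Nat.eq_zero_or_pos j with hj | hj
    · subst hj
      have hlen : l.length = t := by simpa using hn
      have : l.take t = l := List.take_of_length_le (by omega)
      simp [this]
    · have hlen' : (l.drop t).length = j * t := by
        simp only [List.length_drop, hn]
        have : (j + 1) * t = j * t + t := by ring
        omega
      have hfirst : (l.drop t).take t = l.take t := by
        have := hb 1 (by omega)
        simpa using this
      have hb' : ∀ i, i < j → ((l.drop t).drop (i * t)).take t = (l.drop t).take t := by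
        intro i hij
        rw [List.drop_drop, hfirst]
        have heq : t + i * t = (i + 1) * t := by ring
        rw [heq]
        exact hb (i + 1) (by omega)
      have := ih (l.drop t) hlen' hb'
      calc l = l.take t ++ l.drop t := (List.take_append_drop t l).symm
        _ = l.take t ++ (List.replicate j ((l.drop t).take t)).flatten := by rw [← this]
        _ = (List.replicate (j + 1) (l.take t)).flatten := by
              rw [hfirst]; simp [List.replicate_succ]

-- rotation by t ⇒ every block equals the first (t divides the length).
lemma pvBlocksOfRot (l : List Int) (t k : Nat) (hn : l.length = k * t)
    (h : l.drop t ++ l.take t = l) :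
    ∀ i, i < k → (l.drop (i * t)).take t = l.take t := by
  intro i
  induction i with
  | zero => intro _; simp
  | succ j ih =>
    intro hjk
    have hprev := ih (by omega)
    have hstep : l.drop ((j + 1) * t) ++ l.take t = l.drop (j * t) := by
      conv_rhs => rw [← h]
      rw [List.drop_append]
      have h1 : (l.drop t).drop (j * t) = l.drop ((j + 1) * t) := by
        rw [List.drop_drop]; congr 1; ring
      have hjt : j * t + t ≤ k * t := by
        have h := Nat.mul_le_mul_right t (show j + 1 ≤ k by omega)
        calc j * t + t = (j + 1) * t := by ring
          _ ≤ k * t := h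
      have h2 : j * t - (l.drop t).length = 0 := by
        simp only [List.length_drop, hn]
        omega
      rw [h1, h2]
      simp
    have hlongenough : t ≤ (l.drop ((j + 1) * t)).length := by
      simp only [List.length_drop, hn]
      have h := Nat.mul_le_mul_right t (show j + 2 ≤ k by omega)
      have he : (j + 2) * t = (j + 1) * t + t := by ring
      omega
    calc (l.drop ((j + 1) * t)).take t
        = (l.drop ((j + 1) * t) ++ l.take t).take t := by
          rw [List.take_append_of_le_length hlongenough]
      _ = (l.drop (j * t)).take t := by rw [hstep]
      _ = l.take t := hprev

-- every block equals the first ⇒ rotation by t fixes l.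
lemma pvRotOfBlocks (l : List Int) (t k : Nat) (hk : 0 < k) (hn : l.length = k * t)
    (hb : ∀ i, i < k → (l.drop (i * t)).take t = l.take t) :
    l.drop t ++ l.take t = l := by
  have hfl := pvEqFlatten t k l hn hb
  cases k with
  | zero => omega
  | succ j =>
    have hB : (l.take t).length = t := by
      simp only [List.length_take, hn]
      have : t ≤ (j + 1) * t := Nat.le_mul_of_pos_left t (by omega)
      omega
    have hsucc : (List.replicate (j + 1) (l.take t)).flatten
        = l.take t ++ (List.replicate j (l.take t)).flatten := by
      simp [List.replicate_succ]
    have hd : (l.take t ++ (List.replicate j (l.take t)).flatten).drop t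
        = (List.replicate j (l.take t)).flatten := by
      have h : (l.take t ++ (List.replicate j (l.take t)).flatten).drop (l.take t).length
          = (List.replicate j (l.take t)).flatten := List.drop_left
      rwa [hB] at h
    have hdrop : l.drop t = (List.replicate j (l.take t)).flatten := by
      conv_lhs => rw [hfl, hsucc]
      exact hd
    rw [hdrop]
    conv_rhs => rw [hfl]
    rw [List.replicate_succ']
    simp

-- the two loop conditions coincide for any order k dividing the length
lemma pvCheckIff (bec : List Int) (k m : Nat) (hk : 0 < k) (hn : bec.length = k * m) :
    (pvAInner bec ((m : Nat) : Int) (PySem.List.pyRange 1 (k : Int) 1) = true ↔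
      bec = PySem.List.slice bec (some ((m : Nat) : Int)) none ++ PySem.List.slice bec none (some ((m : Nat) : Int))) := by
  rw [pvAInner_eq_true_iff, PySem.List.slice_from_natCast, PySem.List.slice_to_natCast]
  constructor
  · intro hall
    have hb : ∀ i, i < k → (bec.drop (i * m)).take m = bec.take m := by
      intro i hik
      cases i with
      | zero => simp
      | succ j =>
        have hmem : ((j + 1 : Nat) : Int) ∈ PySem.List.pyRange 1 (k : Int) 1 := by
          rw [PySem.List.mem_pyRange_one]
          constructor
          · exact_mod_cast Nat.one_le_iff_ne_zero.mpr (by omega)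
          · exact_mod_cast hik
        have hthis := hall _ hmem
        rw [pvSlice_block bec m _ (by positivity)] at hthis
        simp only [Int.toNat_natCast] at hthis
        exact hthis.symm
    exact (pvRotOfBlocks bec m k hk hn hb).symm
  · intro hrot i hmem
    rw [PySem.List.mem_pyRange_one] at hmem
    have hb := pvBlocksOfRot bec m k hn hrot.symm i.toNat
      (by
        have : i < (k : Int) := hmem.2
        omega)
    rw [pvSlice_block bec m i (by omega)]
    exact hb.symm

-- turn the guard `mod = 0` into divisibility and a Nat factorisation
lemma pvModZero (n : Nat) (k : Nat) (h : PySem.Int.mod (n : Int) (k : Int) = 0) :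
    n = k * (n / k) := by
  rw [PySem.Int.mod_eq_zero_iff_dvd] at h
  have : k ∣ n := by exact_mod_cast h
  exact (Nat.mul_div_cancel' this).symm

lemma pvFloordivNat (n k : Nat) :
    PySem.Int.floordiv (n : Int) (k : Int) = ((n / k : Nat) : Int) := by
  exact_mod_cast PySem.Int.floordiv_natCast n k

-- ===== VERDICT (by name: the statement is the Claim_ definition above) =====
theorem order_of_rotation_spec : Claim_equal_order_of_rotation := by
  intro bec _
  unfold Spec_order_of_rotation order_of_rotation order_of_rotation_alt
  have step : ∀ (k : Nat) (rest rest' : List Int), 0 < k →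
      pvAOuter bec rest = pvBLoop bec (bec.length : Int) rest' →
      pvAOuter bec ((k : Int) :: rest) = pvBLoop bec (bec.length : Int) ((k : Int) :: rest') := by
    intro k rest rest' hk hrec
    by_cases hmod : PySem.Int.mod (bec.length : Int) (k : Int) = 0
    · have hn := pvModZero bec.length k hmod
      have hiff := pvCheckIff bec k (bec.length / k) hk hn
      rw [pvAOuter, pvBLoop]
      simp only [hmod, if_pos, ne_eq, not_true_eq_false, if_false, pvFloordivNat]
      by_cases hcond : bec = PySem.List.slice bec (some ((bec.length / k : Nat) : Int)) none ++
          PySem.List.slice bec none (some ((bec.length / k : Nat) : Int))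
      · rw [if_pos (hiff.mpr hcond), if_pos hcond]
      · rw [if_neg (fun h => hcond (hiff.mp h)), if_neg hcond]
        exact hrec
    · rw [pvAOuter, pvBLoop]
      simp only [hmod, ne_eq, not_false_eq_true, if_true]
      exact hrec
  have base : pvAOuter bec [] = pvBLoop bec (bec.length : Int) [] := rfl
  have h2 := step 2 [] [] (by omega) base
  have h3 := step 3 [(2 : Int)] [(2 : Int)] (by omega) (by exact_mod_cast h2)
  have h6 := step 6 [(3 : Int), (2 : Int)] [(3 : Int), (2 : Int)] (by omega) (by exact_mod_cast h3)
  exact_mod_cast h6
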